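-- pv_equiv track=rewrite | github.com/RaulAdSe/Office-Data-Centralization | scraper/core/element_extractor.py | clean_variable_name
-- ===== SOURCE A (Python) =====
-- from typing import Dict, List, Optional
--
-- def clean_variable_name(group_name: str, options: List[str]) -> str:
--     """Create a clean variable name from radio group name and options"""
--     if not group_name or group_name.startswith('m_'):
--         # Infer name from options
--         if any('hormigón' in opt.lower() or 'concrete' in opt.lower() for opt in options):
--             return "concrete_type"
--         elif any('acero' in opt.lower() or 'steel' in opt.lower() for opt in options):
--             return "steel_type"
--         elif any('vertido' in opt.lower() or 'pour' in opt.lower() for opt in options):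
--             return "pouring_method"
--         elif any('color' in opt.lower() for opt in options):
--             return "color"
--         elif any('acabado' in opt.lower() or 'finish' in opt.lower() for opt in options):
--             return "finish"
--         else:
--             return f"material_option_{group_name}"
--
--     return group_name
-- ===== SOURCE B (Python) =====
-- _KEYWORDS = [
--     ("concrete_type", ("hormigón", "concrete")),
--     ("steel_type", ("acero", "steel")),
--     ("pouring_method", ("vertido", "pour")),
--     ("color", ("color",)),
--     ("finish", ("acabado", "finish")),
-- ]
--
--
-- def clean_variable_name(group_name, options):
--     """Create a clean variable name from radio group name and options"""
--     if group_name and not group_name.startswith('m_'):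
--         return group_name
--     # one pass over the options: collect every category whose keyword occurs
--     matched = set()
--     for opt in options:
--         low = opt.lower()
--         for cat, kws in _KEYWORDS:
--             if any(kw in low for kw in kws):
--                 matched.add(cat)
--     # then pick by fixed category priority
--     for cat, _ in _KEYWORDS:
--         if cat in matched:
--             return cat
--     return f"material_option_{group_name}"
-- ===== Notes on version B (the rewrite author's own statement) =====
-- stated objective: alternative
-- what changed: Replaces five separate any()-scans over the options (each lowercasing every option again) with one pass that lowercases each option once and accumulates matched categories into a set via a keyword table, then a priority walk over the table picks the result.
import Mathlib
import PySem

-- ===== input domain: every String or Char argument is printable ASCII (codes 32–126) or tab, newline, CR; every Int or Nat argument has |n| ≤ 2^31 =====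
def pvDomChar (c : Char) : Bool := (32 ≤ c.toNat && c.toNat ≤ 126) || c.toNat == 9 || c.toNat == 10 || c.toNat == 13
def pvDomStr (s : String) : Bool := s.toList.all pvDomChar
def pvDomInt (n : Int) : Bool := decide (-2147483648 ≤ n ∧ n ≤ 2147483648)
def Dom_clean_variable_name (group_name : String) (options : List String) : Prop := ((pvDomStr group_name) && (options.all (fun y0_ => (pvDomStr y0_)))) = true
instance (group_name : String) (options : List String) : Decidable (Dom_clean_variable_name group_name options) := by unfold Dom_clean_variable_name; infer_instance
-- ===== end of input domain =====

-- B replaces A's five separate any()-scans by one pass over the options that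
-- accumulates matched categories into a set via a keyword table, then a
-- priority walk over the table; same return value, objective: alternative.

-- ===== PORT A =====
def clean_variable_name (group_name : String) (options : List String) : String :=
  if group_name = "" ∨ PySem.Str.startswith group_name "m_" = true then
    if options.any (fun opt => PySem.Str.isIn "hormigón" (PySem.Str.lower opt) || PySem.Str.isIn "concrete" (PySem.Str.lower opt)) then
      "concrete_type"
    else if options.any (fun opt => PySem.Str.isIn "acero" (PySem.Str.lower opt) || PySem.Str.isIn "steel" (PySem.Str.lower opt)) then
      "steel_type"
    else if options.any (fun opt => PySem.Str.isIn "vertido" (PySem.Str.lower opt) || PySem.Str.isIn "pour" (PySem.Str.lower opt)) then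
      "pouring_method"
    else if options.any (fun opt => PySem.Str.isIn "color" (PySem.Str.lower opt)) then
      "color"
    else if options.any (fun opt => PySem.Str.isIn "acabado" (PySem.Str.lower opt) || PySem.Str.isIn "finish" (PySem.Str.lower opt)) then
      "finish"
    else
      "material_option_" ++ group_name
  else
    group_name

-- ===== PORT B =====
-- the keyword table _KEYWORDS of Source B
def cvnKeywords : List (String × List String) :=
  [("concrete_type", ["hormigón", "concrete"]),
   ("steel_type", ["acero", "steel"]),
   ("pouring_method", ["vertido", "pour"]),
   ("color", ["color"]),
   ("finish", ["acabado", "finish"])]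

-- inner loop body: add to the set every category one (lowered) option matches
def cvnStep (s : PySem.Set String) (opt : String) : PySem.Set String :=
  let low := PySem.Str.lower opt
  cvnKeywords.foldl
    (fun s p => if p.2.any (fun kw => PySem.Str.isIn kw low) then PySem.Set.add s p.1 else s) s

def clean_variable_name_alt (group_name : String) (options : List String) : String :=
  if group_name ≠ "" ∧ PySem.Str.startswith group_name "m_" = false then
    group_name
  else
    let matched : PySem.Set String := options.foldl cvnStep PySem.Set.empty
    match cvnKeywords.find? (fun p => PySem.Set.contains matched p.1) with
    | some p => p.1
    | none => "material_option_" ++ group_name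

-- ===== PRECONDITION & SPEC =====
def Spec_clean_variable_name (group_name : String) (options : List String) (out : String) : Prop := out = clean_variable_name_alt group_name options
instance (group_name : String) (options : List String) (out : String) : Decidable (Spec_clean_variable_name group_name options out) := by unfold Spec_clean_variable_name; infer_instance

-- ===== CLAIM (what is proved, stated in full; the proofs are below) =====
def Claim_equal_clean_variable_name : Prop := ∀ (group_name : String) (options : List String), Dom_clean_variable_name group_name options → Spec_clean_variable_name group_name options (clean_variable_name group_name options)

-- ===== LEMMAS AND PROOFS =====

-- membership after the inner (table) fold
theorem mem_cvn_tableFold (table : List (String × List String)) (s : PySem.Set String)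
    (low : String) (c : String) :
    (c ∈ table.foldl
        (fun s p => if p.2.any (fun kw => PySem.Str.isIn kw low) then PySem.Set.add s p.1 else s) s)
      ↔ c ∈ s ∨ ∃ p ∈ table, p.1 = c ∧ p.2.any (fun kw => PySem.Str.isIn kw low) = true := by
  induction table generalizing s with
  | nil => simp
  | cons hd tl ih =>
    simp only [List.foldl_cons]
    rw [ih]
    by_cases h : (hd.2.any fun kw => PySem.Str.isIn kw low) = true
    · rw [if_pos h]
      constructor
      · rintro (hm | ⟨p, hp, hpc, hpa⟩)
        · rcases (PySem.Set.mem_add _ _ _).mp hm with hc | rfl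
          · exact .inl hc
          · exact .inr ⟨hd, List.mem_cons_self, rfl, h⟩
        · exact .inr ⟨p, List.mem_cons_of_mem _ hp, hpc, hpa⟩
      · rintro (hc | ⟨p, hp, hpc, hpa⟩)
        · exact .inl ((PySem.Set.mem_add _ _ _).mpr (.inl hc))
        · rcases List.mem_cons.mp hp with rfl | hp'
          · exact .inl ((PySem.Set.mem_add _ _ _).mpr (.inr hpc.symm))
          · exact .inr ⟨p, hp', hpc, hpa⟩
    · rw [if_neg h]
      constructor
      · rintro (hc | ⟨p, hp, hpc, hpa⟩)
        · exact .inl hc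
        · exact .inr ⟨p, List.mem_cons_of_mem _ hp, hpc, hpa⟩
      · rintro (hc | ⟨p, hp, hpc, hpa⟩)
        · exact .inl hc
        · rcases List.mem_cons.mp hp with rfl | hp'
          · exact absurd hpa h
          · exact .inr ⟨p, hp', hpc, hpa⟩
-- membership in the matched set after the outer fold
theorem mem_cvn_matched (options : List String) (s : PySem.Set String) (c : String) :
    (c ∈ options.foldl cvnStep s)
      ↔ c ∈ s ∨ ∃ opt ∈ options, ∃ p ∈ cvnKeywords,
          p.1 = c ∧ p.2.any (fun kw => PySem.Str.isIn kw (PySem.Str.lower opt)) = true := by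
  induction options generalizing s with
  | nil => simp
  | cons hd tl ih =>
    simp only [List.foldl_cons]
    rw [ih, cvnStep, mem_cvn_tableFold]
    constructor
    · rintro ((hc | h1) | h2)
      · exact .inl hc
      · exact .inr ⟨hd, by simp, h1⟩
      · obtain ⟨opt, hopt, h⟩ := h2
        exact .inr ⟨opt, by simp [hopt], h⟩
    · rintro (hc | ⟨opt, hopt, h⟩)
      · exact .inl (.inl hc)
      · rcases List.mem_cons.mp hopt with rfl | hopt'
        · exact .inl (.inr h)
        · exact .inr ⟨opt, hopt', h⟩

-- the matched set contains a category of the table iff some option matches its keywords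
theorem contains_cvn_matched (options : List String) (c : String) (kws : List String)
    (hmem : (c, kws) ∈ cvnKeywords)
    (huniq : ∀ p ∈ cvnKeywords, p.1 = c → p.2 = kws) :
    PySem.Set.contains (options.foldl cvnStep PySem.Set.empty) c
      = options.any (fun opt => kws.any (fun kw => PySem.Str.isIn kw (PySem.Str.lower opt))) := by
  rcases h : options.any (fun opt => kws.any (fun kw => PySem.Str.isIn kw (PySem.Str.lower opt))) with _ | _
  · rw [Bool.eq_false_iff]
    intro hcon
    rw [PySem.Set.contains_iff, mem_cvn_matched] at hcon
    rcases hcon with hc | ⟨opt, hopt, p, hp, hpc, hany⟩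
    · simp [PySem.Set.empty] at hc
    · have := huniq p hp hpc
      rw [Bool.eq_false_iff] at h
      exact h (List.any_eq_true.mpr ⟨opt, hopt, by rw [← this]; exact hany⟩)
  · rw [PySem.Set.contains_iff, mem_cvn_matched]
    obtain ⟨opt, hopt, hany⟩ := List.any_eq_true.mp h
    exact .inr ⟨opt, hopt, (c, kws), hmem, rfl, hany⟩

-- ===== VERDICT (by name: the statement is the Claim_ definition above) =====
theorem clean_variable_name_spec : Claim_equal_clean_variable_name := by
  intro g options _
  unfold Spec_clean_variable_name clean_variable_name clean_variable_name_alt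
  by_cases hg : g = "" ∨ PySem.Str.startswith g "m_" = true
  · have hB : ¬ (g ≠ "" ∧ PySem.Str.startswith g "m_" = false) := by
      rintro ⟨hne, hf⟩
      rcases hg with rfl | hs
      · exact hne rfl
      · rw [hs] at hf; cases hf
    rw [if_pos hg, if_neg hB]
    have h1 := contains_cvn_matched options "concrete_type" ["hormigón", "concrete"] (by decide) (by decide)
    have h2 := contains_cvn_matched options "steel_type" ["acero", "steel"] (by decide) (by decide)
    have h3 := contains_cvn_matched options "pouring_method" ["vertido", "pour"] (by decide) (by decide)
    have h4 := contains_cvn_matched options "color" ["color"] (by decide) (by decide)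
    have h5 := contains_cvn_matched options "finish" ["acabado", "finish"] (by decide) (by decide)
    simp only [List.any_cons, List.any_nil, Bool.or_false] at h1 h2 h3 h4 h5
    show _ = (match cvnKeywords.find? _ with | some p => p.1 | none => _)
    simp only [cvnKeywords, List.find?, h1, h2, h3, h4, h5]
    rcases hb1 : options.any (fun opt => PySem.Str.isIn "hormigón" (PySem.Str.lower opt) || PySem.Str.isIn "concrete" (PySem.Str.lower opt)) with _|_ <;>
    rcases hb2 : options.any (fun opt => PySem.Str.isIn "acero" (PySem.Str.lower opt) || PySem.Str.isIn "steel" (PySem.Str.lower opt)) with _|_ <;>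
    rcases hb3 : options.any (fun opt => PySem.Str.isIn "vertido" (PySem.Str.lower opt) || PySem.Str.isIn "pour" (PySem.Str.lower opt)) with _|_ <;>
    rcases hb4 : options.any (fun opt => PySem.Str.isIn "color" (PySem.Str.lower opt)) with _|_ <;>
    rcases hb5 : options.any (fun opt => PySem.Str.isIn "acabado" (PySem.Str.lower opt) || PySem.Str.isIn "finish" (PySem.Str.lower opt)) with _|_ <;>
    simp only [if_true, if_false, Bool.false_eq_true]
  · rw [if_neg hg]
    have hB : g ≠ "" ∧ PySem.Str.startswith g "m_" = false := by
      refine ⟨fun h => hg (.inl h), ?_⟩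
      cases hq : PySem.Str.startswith g "m_"
      · rfl
      · exact absurd (.inr hq) hg
    rw [if_pos hB]
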